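-- pv_equiv track=rewrite | github.com/seoanezonjic/NetAnalyzer | NetAnalyzer/ranker.py | add_absolute_rank_column
-- ===== SOURCE A (Python) =====
-- def add_absolute_rank_column(ranking):
--   ranking_with_new_column = []
--   absolute_rank = 1
--   n_rows = len(ranking)
--   for row_pos in range(n_rows):
--     if row_pos == 0:
--       new_row = ranking[row_pos] + [absolute_rank]
--       ranking_with_new_column.append(new_row)
--     else:
--       prev_val = ranking[row_pos-1][2]
--       val = ranking[row_pos][2]
--       if val > prev_val:
--         absolute_rank += 1
--
--       new_row = ranking[row_pos] + [absolute_rank]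
--       ranking_with_new_column.append(new_row)
--   return ranking_with_new_column
-- ===== SOURCE B (Python) =====
-- def add_absolute_rank_column(ranking):
--     # 1 where the third field strictly increases between consecutive rows
--     flags = [1 if b[2] > a[2] else 0 for a, b in zip(ranking, ranking[1:])]
--     # prefix-accumulate the flags starting from rank 1
--     ranks = [1]
--     for f in flags:
--         ranks.append(ranks[-1] + f)
--     # combine: zip truncates ranks to len(ranking) (drops the lone 1 on empty input)
--     return [row + [r] for row, r in zip(ranking, ranks)]
-- ===== Notes on version B (the rewrite author's own statement) =====
-- stated objective: alternative
-- what changed: Replaces the index-driven loop carrying a mutable rank counter by three data-flow passes: pairwise strict-increase flags via zip(ranking, ranking[1:]), a prefix accumulation turning flags into dense ranks, and a zip-combine appending the ranks.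
import Mathlib
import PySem

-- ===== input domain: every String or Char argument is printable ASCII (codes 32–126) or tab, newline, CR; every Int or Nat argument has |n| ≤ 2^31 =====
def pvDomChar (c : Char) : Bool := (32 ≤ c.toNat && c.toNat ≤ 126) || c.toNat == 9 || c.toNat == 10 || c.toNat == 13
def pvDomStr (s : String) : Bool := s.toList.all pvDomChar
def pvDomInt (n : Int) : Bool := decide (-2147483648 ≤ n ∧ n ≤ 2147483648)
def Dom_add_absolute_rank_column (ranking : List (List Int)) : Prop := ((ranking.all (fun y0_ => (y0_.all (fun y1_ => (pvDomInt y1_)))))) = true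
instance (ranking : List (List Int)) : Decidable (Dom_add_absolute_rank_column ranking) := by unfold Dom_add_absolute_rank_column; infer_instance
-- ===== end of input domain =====

-- B replaces A's index-driven loop with a flags / prefix-accumulate / zip-combine pipeline (alternative decomposition, same O(n) cost).


-- ===== PORT A =====
-- A's for-loop over range(n_rows): a foldl over the index list carrying
-- (accumulated output, absolute_rank); indexing via pyGet? with a default that
-- Pre_ guarantees is never consulted.
def add_absolute_rank_column (ranking : List (List Int)) : List (List Int) :=
  ((PySem.List.pyRange 0 (ranking.length : Int) 1).foldl
    (fun (st : List (List Int) × Int) row_pos =>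
      if row_pos = 0 then
        (st.1 ++ [((PySem.List.pyGet? ranking row_pos).getD []) ++ [st.2]], st.2)
      else
        let prev_val := (PySem.List.pyGet? ((PySem.List.pyGet? ranking (row_pos - 1)).getD []) 2).getD 0
        let val := (PySem.List.pyGet? ((PySem.List.pyGet? ranking row_pos).getD []) 2).getD 0
        let ar := if val > prev_val then st.2 + 1 else st.2
        (st.1 ++ [((PySem.List.pyGet? ranking row_pos).getD []) ++ [ar]], ar))
    ([], 1)).1

-- ===== PORT B =====
-- Source B: pairwise flags, prefix accumulation (ranks[-1] + f), zip-combine.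
def add_absolute_rank_column_alt (ranking : List (List Int)) : List (List Int) :=
  let flags := (ranking.zip (ranking.drop 1)).map
    (fun p => if (PySem.List.pyGet? p.2 2).getD 0 > (PySem.List.pyGet? p.1 2).getD 0 then (1 : Int) else 0)
  let ranks := flags.foldl (fun (rs : List Int) f => rs ++ [rs.getLast?.getD 0 + f]) [1]
  (ranking.zip ranks).map (fun p => p.1 ++ [p.2])

-- ===== PRECONDITION & SPEC =====
-- Pre_ excludes exactly the inputs where the Python A raises IndexError: with two
-- or more rows every row's third field is read, so some row shorter than 3 makes
-- A raise (B raises identically there).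
def Pre_add_absolute_rank_column (ranking : List (List Int)) : Prop :=
  ranking.length ≤ 1 ∨ ∀ row ∈ ranking, 3 ≤ row.length
instance (ranking : List (List Int)) : Decidable (Pre_add_absolute_rank_column ranking) := by
  unfold Pre_add_absolute_rank_column; infer_instance
def pvWitness_add_absolute_rank_column : List (List Int) := [[5, 6, 2], [7, 8, 2], [1, 2, 9]]
def Spec_add_absolute_rank_column (ranking : List (List Int)) (out : List (List Int)) : Prop := out = add_absolute_rank_column_alt ranking
instance (ranking : List (List Int)) (out : List (List Int)) : Decidable (Spec_add_absolute_rank_column ranking out) := by unfold Spec_add_absolute_rank_column; infer_instance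

-- ===== CLAIM (what is proved, stated in full; the proofs are below) =====
def Claim_equal_add_absolute_rank_column : Prop := ∀ (ranking : List (List Int)), Dom_add_absolute_rank_column ranking → Pre_add_absolute_rank_column ranking → Spec_add_absolute_rank_column ranking (add_absolute_rank_column ranking)

-- ===== LEMMAS AND PROOFS =====

-- third field (total reading; Pre_ makes the default irrelevant, the ports agree even with it)
def pvVal (row : List Int) : Int := (PySem.List.pyGet? row 2).getD 0

-- the common recursive spec: remaining rows with their dense ranks appended
def pvChain (ar : Int) (prev : List Int) : List (List Int) → List (List Int)
  | [] => []
  | r :: rs =>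
      let ar' := if pvVal r > pvVal prev then ar + 1 else ar
      (r ++ [ar']) :: pvChain ar' r rs

-- the ranks alone (B's accumulated list, past the leading 1)
def pvRanks (ar : Int) (prev : List Int) : List (List Int) → List Int
  | [] => []
  | r :: rs =>
      let ar' := if pvVal r > pvVal prev then ar + 1 else ar
      ar' :: pvRanks ar' r rs

theorem pvChain_eq_zip (ar : Int) (prev : List Int) (rest : List (List Int)) :
    pvChain ar prev rest = (rest.zip (pvRanks ar prev rest)).map (fun p => p.1 ++ [p.2]) := by
  induction rest generalizing ar prev with
  | nil => rfl
  | cons r rs ih => simp [pvChain, pvRanks, ih]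

-- A's loop body, named for the invariant lemma (definitionally the port's lambda)
def pvBodyA (ranking : List (List Int)) (st : List (List Int) × Int) (row_pos : Int) :
    List (List Int) × Int :=
  if row_pos = 0 then
    (st.1 ++ [((PySem.List.pyGet? ranking row_pos).getD []) ++ [st.2]], st.2)
  else
    let prev_val := (PySem.List.pyGet? ((PySem.List.pyGet? ranking (row_pos - 1)).getD []) 2).getD 0
    let val := (PySem.List.pyGet? ((PySem.List.pyGet? ranking row_pos).getD []) 2).getD 0
    let ar := if val > prev_val then st.2 + 1 else st.2
    (st.1 ++ [((PySem.List.pyGet? ranking row_pos).getD []) ++ [ar]], ar)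

theorem pvPortA_eq (ranking : List (List Int)) :
    add_absolute_rank_column ranking
      = ((PySem.List.pyRange 0 (ranking.length : Int) 1).foldl (pvBodyA ranking) ([], 1)).1 := rfl

-- invariant of A's loop from index i ≥ 1 on
theorem pvLoopA (ranking : List (List Int)) :
    ∀ (k i : Nat), ranking.length = i + k → 1 ≤ i → ∀ (acc : List (List Int)) (ar : Int),
      ((PySem.List.pyRange (i : Int) (ranking.length : Int) 1).foldl (pvBodyA ranking) (acc, ar)).1
        = acc ++ pvChain ar (ranking.getD (i - 1) []) (ranking.drop i) := by
  intro k
  induction k with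
  | zero =>
      intro i hlen _ acc ar
      rw [PySem.List.pyRange_one_eq_nil (a := (i : Int)) (b := (ranking.length : Int))
        (by exact_mod_cast (by omega : ranking.length ≤ i))]
      rw [List.drop_of_length_le (by omega)]
      simp [pvChain]
  | succ k ih =>
      intro i hlen hi acc ar
      have hilt : i < ranking.length := by omega
      rw [PySem.List.pyRange_one_cons (by exact_mod_cast hilt)]
      have hstep :
          pvBodyA ranking (acc, ar) (i : Int)
            = (acc ++ [ranking.getD i [] ++
                [if pvVal (ranking.getD i []) > pvVal (ranking.getD (i - 1) []) then ar + 1 else ar]],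
               if pvVal (ranking.getD i []) > pvVal (ranking.getD (i - 1) []) then ar + 1 else ar) := by
        have hne : ¬ i = 0 := by omega
        have hsub : (i : Int) - 1 = ((i - 1 : Nat) : Int) := by omega
        simp [pvBodyA, hne, hsub, PySem.List.pyGet?_natCast, pvVal, List.getD]
      rw [List.foldl_cons, hstep]
      have hcast : ((i : Int) + 1) = ((i + 1 : Nat) : Int) := by omega
      rw [hcast, ih (i + 1) (by omega) (by omega)]
      have hdrop : ranking.drop i = ranking.getD i [] :: ranking.drop (i + 1) := by
        rw [List.getD_eq_getElem ranking [] hilt]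
        exact List.drop_eq_getElem_cons hilt
      rw [hdrop]
      simp [pvChain]
  -- end pvLoopA

-- B's accumulation loop: appending flags extends the ranks list by pvRanks
theorem pvLoopB (rest : List (List Int)) :
    ∀ (prev : List Int) (rs : List Int) (ar : Int), rs.getLast? = some ar →
      ((((prev :: rest).zip rest).map
          (fun p => if (PySem.List.pyGet? p.2 2).getD 0 > (PySem.List.pyGet? p.1 2).getD 0 then (1 : Int) else 0)).foldl
        (fun (rs : List Int) f => rs ++ [rs.getLast?.getD 0 + f]) rs)
        = rs ++ pvRanks ar prev rest := by
  induction rest with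
  | nil => intro prev rs ar _; simp [pvRanks]
  | cons r t ih =>
      intro prev rs ar hlast
      have hzip : (prev :: r :: t).zip (r :: t) = (prev, r) :: (r :: t).zip t := rfl
      rw [hzip, List.map_cons, List.foldl_cons]
      rw [ih r (rs ++ [rs.getLast?.getD 0 +
            if (PySem.List.pyGet? r 2).getD 0 > (PySem.List.pyGet? prev 2).getD 0 then (1 : Int) else 0])
          (rs.getLast?.getD 0 +
            if (PySem.List.pyGet? r 2).getD 0 > (PySem.List.pyGet? prev 2).getD 0 then (1 : Int) else 0)
          (by simp)]
      have har : rs.getLast?.getD 0 = ar := by rw [hlast]; rfl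
      have key : (rs.getLast?.getD 0 +
            if (PySem.List.pyGet? r 2).getD 0 > (PySem.List.pyGet? prev 2).getD 0 then (1 : Int) else 0)
          = (if pvVal r > pvVal prev then ar + 1 else ar) := by
        rw [har]; unfold pvVal; split <;> omega
      simp only [key, pvRanks, List.append_assoc, List.singleton_append]

theorem pvAlt_cons (r0 : List Int) (rest : List (List Int)) :
    add_absolute_rank_column_alt (r0 :: rest)
      = (r0 ++ [1]) :: pvChain 1 r0 rest := by
  unfold add_absolute_rank_column_alt
  simp only [List.drop_one, List.tail_cons]
  rw [pvLoopB rest r0 [1] 1 rfl]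
  have : ([(1 : Int)] ++ pvRanks 1 r0 rest) = 1 :: pvRanks 1 r0 rest := rfl
  rw [this]
  simp [List.zip_cons_cons, pvChain_eq_zip]

theorem pvAB (ranking : List (List Int)) :
    add_absolute_rank_column ranking = add_absolute_rank_column_alt ranking := by
  cases ranking with
  | nil => rfl
  | cons r0 rest =>
      rw [pvPortA_eq, pvAlt_cons]
      have hlen : ((r0 :: rest).length : Int) = ((rest.length + 1 : Nat) : Int) := by
        simp [List.length_cons]
      rw [hlen, PySem.List.pyRange_one_cons (by positivity)]
      have hstep : pvBodyA (r0 :: rest) (([], 1) : List (List Int) × Int) 0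
          = ([r0 ++ [1]], 1) := by
        simp [pvBodyA, PySem.List.pyGet?, PySem.List.pyIdx?]
      rw [List.foldl_cons, hstep]
      have h01 : ((0 : Int) + 1) = ((1 : Nat) : Int) := by norm_num
      rw [h01]
      have := pvLoopA (r0 :: rest) rest.length 1 (by omega) (le_refl 1) [r0 ++ [1]] 1
      rw [show ((rest.length + 1 : Nat) : Int) = ((r0 :: rest).length : Int) by simp] at *
      rw [this]
      simp

-- ===== VERDICT (by name: the statement is the Claim_ definition above) =====
theorem add_absolute_rank_column_spec : Claim_equal_add_absolute_rank_column := by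
  intro ranking _ _
  unfold Spec_add_absolute_rank_column
  exact pvAB ranking
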